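-- pv_equiv track=rewrite | github.com/Adebayo-Adesegun/Algorithms-and-DataStructures-in-Python | is_array_zigzag.py | isZigzag
-- ===== SOURCE A (Python) =====
-- def isZigzag(numbers):
--
--     n = len(numbers)
--     zig_zag_ret = []
--
--
--     for zz in range(n):
--         if zz + 2 > n - 1 or zz + 1 > n - 1:
--             return zig_zag_ret
--
--         if numbers[zz] < numbers[zz+1] and numbers[zz+1] > numbers[zz+2]:
--             zig_zag_ret.append(1)
--         elif numbers[zz] > numbers[zz+1] and numbers[zz+1] < numbers[zz+2]:
--             zig_zag_ret.append(1)
--         else: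
--             zig_zag_ret.append(0)
--
--
--     return zig_zag_ret
-- ===== SOURCE B (Python) =====
-- def isZigzag(numbers):
--     # run-length encode the strict direction of each adjacent step, then emit
--     # one zero per interior step of a run and one mark per run boundary
--     runs = []
--     for a, b in zip(numbers, numbers[1:]):
--         s = (a < b) - (a > b)
--         if runs and runs[-1][0] == s:
--             runs[-1][1] += 1
--         else:
--             runs.append([s, 1])
--     out = []
--     prev = None
--     for s, length in runs:
--         if prev is not None:
--             out.append(1 if prev * s == -1 else 0)
--         out.extend([0] * (length - 1))
--         prev = s
--     return out
-- ===== Notes on version B (the rewrite author's own statement) =====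
-- stated objective: alternative
-- what changed: B run-length encodes the strict direction of adjacent steps into maximal monotone runs and then emits the output per run (zeros for a run's interior, one mark per boundary between strictly opposite runs), instead of A's index loop testing each raw triple with an in-loop early-return guard.
import Mathlib
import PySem

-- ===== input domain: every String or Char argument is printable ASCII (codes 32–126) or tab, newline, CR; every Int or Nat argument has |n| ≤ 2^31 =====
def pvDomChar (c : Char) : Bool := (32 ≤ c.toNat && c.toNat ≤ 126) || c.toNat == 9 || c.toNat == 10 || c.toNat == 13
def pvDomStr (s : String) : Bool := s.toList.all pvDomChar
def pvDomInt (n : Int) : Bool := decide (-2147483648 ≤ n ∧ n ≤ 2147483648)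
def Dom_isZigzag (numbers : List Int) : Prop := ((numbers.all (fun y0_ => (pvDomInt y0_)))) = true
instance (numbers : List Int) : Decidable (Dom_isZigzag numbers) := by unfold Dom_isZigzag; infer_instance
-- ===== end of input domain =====

-- B run-length encodes the strict direction of adjacent steps into maximal monotone runs and
-- emits zeros per run interior and one mark per run boundary; A tests each raw triple in an
-- index loop with an early-return guard.

-- ===== PORT A =====
-- the 'for zz in range(n)' loop with its early 'return zig_zag_ret'; fuel = remaining iterations of range(n)
def isZigzagGo (numbers : List Int) (n : Int) : Nat → Int → List Int → List Int
  | 0, _, acc => acc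
  | fuel + 1, zz, acc =>
    if zz + 2 > n - 1 ∨ zz + 1 > n - 1 then acc
    else
      match PySem.List.pyGet? numbers zz, PySem.List.pyGet? numbers (zz + 1), PySem.List.pyGet? numbers (zz + 2) with
      | some a, some b, some c =>
          isZigzagGo numbers n fuel (zz + 1)
            (acc ++ [if a < b ∧ b > c then (1 : Int) else if a > b ∧ b < c then 1 else 0])
      | _, _, _ => acc  -- unreachable: the guard keeps all three indices in range

def isZigzag (numbers : List Int) : List Int :=
  let n : Int := numbers.length
  isZigzagGo numbers n n.toNat 0 []

-- ===== PORT B =====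
-- s = (a < b) - (a > b)
def sign3 (a b : Int) : Int := (if a < b then (1 : Int) else 0) - (if a > b then 1 else 0)

-- 'if runs and runs[-1][0] == s: runs[-1][1] += 1 else: runs.append([s, 1])'
def addSign (runs : List (Int × Nat)) (s : Int) : List (Int × Nat) :=
  match runs.getLast? with
  | some (s0, l) => if s0 = s then runs.dropLast ++ [(s0, l + 1)] else runs ++ [(s, 1)]
  | none => [(s, 1)]

-- the second Python loop: boundary mark (when prev exists) then length-1 zeros, per run
def emitRuns : List (Int × Nat) → Option Int → List Int
  | [], _ => []
  | (s, l) :: rest, prev =>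
      (match prev with
       | some p => [if p * s = -1 then (1 : Int) else 0]
       | none => []) ++ List.replicate (l - 1) 0 ++ emitRuns rest (some s)

def isZigzag_alt (numbers : List Int) : List Int :=
  let runs := (numbers.zip numbers.tail).foldl (fun rs p => addSign rs (sign3 p.1 p.2)) []
  emitRuns runs none

-- ===== PRECONDITION & SPEC =====
def Spec_isZigzag (numbers : List Int) (out : List Int) : Prop := out = isZigzag_alt numbers
instance (numbers : List Int) (out : List Int) : Decidable (Spec_isZigzag numbers out) := by unfold Spec_isZigzag; infer_instance

-- ===== CLAIM (what is proved, stated in full; the proofs are below) =====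
def Claim_equal_isZigzag : Prop := ∀ (numbers : List Int), Dom_isZigzag numbers → Spec_isZigzag numbers (isZigzag numbers)

-- ===== LEMMAS AND PROOFS =====

-- common reference function: one pass over overlapping triples
def zig : List Int → List Int
  | a :: b :: c :: rest =>
      (if (a < b ∧ b > c) ∨ (a > b ∧ b < c) then (1 : Int) else 0) :: zig (b :: c :: rest)
  | _ => []

lemma zig_short {xs : List Int} (h : xs.length < 3) : zig xs = [] := by
  match xs, h with
  | [], _ => rfl
  | [_], _ => rfl
  | [_, _], _ => rfl

lemma isZigzagGo_eq (numbers : List Int) :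
    ∀ (fuel k : Nat) (acc : List Int), k + fuel = numbers.length →
      isZigzagGo numbers numbers.length fuel (k : Int) acc = acc ++ zig (numbers.drop k) := by
  intro fuel
  induction fuel with
  | zero =>
      intro k acc hk
      have h3 : (numbers.drop k).length < 3 := by simp; omega
      rw [zig_short h3]
      simp [isZigzagGo]
  | succ fuel ih =>
      intro k acc hk
      by_cases hg : ((k : Int) + 2 > (numbers.length : Int) - 1 ∨ (k : Int) + 1 > (numbers.length : Int) - 1)
      · rw [isZigzagGo, if_pos hg]
        have : (numbers.drop k).length < 3 := by simp [List.length_drop]; omega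
        simp [zig_short this]
      · rw [isZigzagGo, if_neg hg]
        push Not at hg
        have hk2 : k + 2 < numbers.length := by omega
        have h0 : PySem.List.pyGet? numbers (k : Int) = some numbers[k] := by
          rw [PySem.List.pyGet?_natCast]; exact List.getElem?_eq_getElem (by omega)
        have h1 : PySem.List.pyGet? numbers ((k : Int) + 1) = some numbers[k + 1] := by
          rw [show ((k : Int) + 1) = ((k + 1 : Nat) : Int) by push_cast; ring,
              PySem.List.pyGet?_natCast]
          exact List.getElem?_eq_getElem (by omega)
        have h2 : PySem.List.pyGet? numbers ((k : Int) + 2) = some numbers[k + 2] := by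
          rw [show ((k : Int) + 2) = ((k + 2 : Nat) : Int) by push_cast; ring,
              PySem.List.pyGet?_natCast]
          exact List.getElem?_eq_getElem (by omega)
        rw [h0, h1, h2]
        show isZigzagGo numbers (numbers.length : Int) fuel ((k : Int) + 1)
            (acc ++ [if numbers[k] < numbers[k+1] ∧ numbers[k+1] > numbers[k+2] then (1 : Int)
                     else if numbers[k] > numbers[k+1] ∧ numbers[k+1] < numbers[k+2] then 1 else 0])
          = acc ++ zig (numbers.drop k)
        rw [show ((k : Int) + 1) = ((k + 1 : Nat) : Int) by push_cast; ring,
            ih (k + 1) _ (by omega)]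
        have hdrop : numbers.drop k =
            numbers[k] :: numbers[k+1] :: numbers[k+2] :: numbers.drop (k + 3) := by
          rw [List.drop_eq_getElem_cons (by omega), List.drop_eq_getElem_cons (h := by omega),
              List.drop_eq_getElem_cons (h := by omega)]
        have hdrop1 : numbers.drop (k + 1) =
            numbers[k+1] :: numbers[k+2] :: numbers.drop (k + 3) := by
          rw [List.drop_eq_getElem_cons (h := by omega), List.drop_eq_getElem_cons (h := by omega)]
        rw [hdrop, hdrop1, zig]
        simp only [List.append_assoc, List.singleton_append]
        congr 1
        split_ifs <;> first | rfl | omega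

-- the same judgement, phrased on the sign sequence
def zag : List Int → List Int
  | x :: y :: r => (if x * y = -1 then (1 : Int) else 0) :: zag (y :: r)
  | _ => []

lemma zig_eq_zag : ∀ (xs : List Int),
    zig xs = zag ((xs.zip xs.tail).map (fun p => sign3 p.1 p.2)) := by
  intro xs
  match xs with
  | [] => rfl
  | [_] => rfl
  | [_, _] => rfl
  | a :: b :: c :: rest =>
      have ih := zig_eq_zag (b :: c :: rest)
      simp only [zig, List.tail_cons, List.zip_cons_cons, List.map_cons] at ih ⊢
      rw [ih, zag]
      congr 1
      simp only [sign3]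
      split_ifs <;> omega
termination_by xs => xs.length

-- the foldl of addSign, once the accumulator is a nonempty run list, grows its last run
def grow : Int → Nat → List Int → List (Int × Nat)
  | x, l, [] => [(x, l)]
  | x, l, y :: r => if x = y then grow x (l + 1) r else (x, l) :: grow y 1 r

lemma foldl_addSign_eq_grow : ∀ (s : List Int) (acc : List (Int × Nat)) (x : Int) (l : Nat),
    List.foldl addSign (acc ++ [(x, l)]) s = acc ++ grow x l s := by
  intro s
  induction s with
  | nil => intro acc x l; simp [grow]
  | cons y r ih =>
      intro acc x l
      rw [List.foldl_cons]
      have hstep : addSign (acc ++ [(x, l)]) y =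
          if x = y then acc ++ [(x, l + 1)] else (acc ++ [(x, l)]) ++ [(y, 1)] := by
        simp [addSign]
      rw [hstep, grow]
      by_cases hxy : x = y
      · rw [if_pos hxy, if_pos hxy, ih acc x (l + 1)]
      · rw [if_neg hxy, if_neg hxy, ih (acc ++ [(x, l)]) y 1, List.append_assoc]
        simp

lemma sq_ne_negone (x : Int) : ¬ (x * x = -1) := by nlinarith [mul_self_nonneg x]

lemma emit_grow : ∀ (s : List Int) (x : Int) (l : Nat) (prev : Option Int), 1 ≤ l →
    emitRuns (grow x l s) prev =
      (match prev with
       | some p => [if p * x = -1 then (1 : Int) else 0]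
       | none => []) ++ List.replicate (l - 1) 0 ++ zag (x :: s) := by
  intro s
  induction s with
  | nil => intro x l prev hl; simp [grow, emitRuns, zag]
  | cons y r ih =>
      intro x l prev hl
      rw [grow]
      by_cases hxy : x = y
      · rw [if_pos hxy]
        subst hxy
        rw [ih x (l + 1) prev (by omega)]
        rw [show zag (x :: x :: r) = (0 : Int) :: zag (x :: r) by
          rw [zag, if_neg (sq_ne_negone x)]]
        rw [show l + 1 - 1 = (l - 1) + 1 by omega, List.replicate_succ' (a := (0:Int)) (n := l - 1)]
        simp
      · rw [if_neg hxy, show emitRuns ((x, l) :: grow y 1 r) prev = (match prev with | some p => [if p * x = -1 then (1 : Int) else 0] | none => []) ++ List.replicate (l - 1) 0 ++ emitRuns (grow y 1 r) (some x) from by simp [emitRuns], ih y 1 (some x) (by omega)]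
        rw [show zag (x :: y :: r) = (if x * y = -1 then (1 : Int) else 0) :: zag (y :: r) from rfl]
        simp

lemma foldl_signs : ∀ (ps : List (Int × Int)) (acc : List (Int × Nat)),
    List.foldl (fun rs p => addSign rs (sign3 p.1 p.2)) acc ps =
      List.foldl addSign acc (ps.map (fun p => sign3 p.1 p.2)) := by
  intro ps
  induction ps with
  | nil => intro acc; rfl
  | cons p r ih => intro acc; simp [List.foldl_cons, ih]

lemma alt_eq_zag (xs : List Int) :
    isZigzag_alt xs = zag ((xs.zip xs.tail).map (fun p => sign3 p.1 p.2)) := by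
  unfold isZigzag_alt
  show emitRuns (List.foldl (fun rs p => addSign rs (sign3 p.1 p.2)) [] (xs.zip xs.tail)) none = _
  rw [foldl_signs (xs.zip xs.tail) []]
  cases h : (xs.zip xs.tail).map (fun p => sign3 p.1 p.2) with
  | nil => rfl
  | cons x rest =>
      rw [List.foldl_cons]
      have h1 : addSign [] x = [] ++ [(x, 1)] := by simp [addSign]
      rw [h1, foldl_addSign_eq_grow rest [] x 1, List.nil_append,
          emit_grow rest x 1 none (by omega)]
      simp

-- ===== VERDICT (by name: the statement is the Claim_ definition above) =====
theorem isZigzag_spec : Claim_equal_isZigzag := by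
  intro numbers _
  unfold Spec_isZigzag isZigzag
  rw [alt_eq_zag, ← zig_eq_zag]
  have h := isZigzagGo_eq numbers numbers.length 0 [] (by omega)
  simpa using h
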